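-- pv_equiv track=rewrite | github.com/arthur-thuy/qde-ordinality | src/discretizer/discretizer.py | _get_bin_indices_inner
-- ===== SOURCE A (Python) =====
-- def _get_bin_indices_inner(
--     bins: int,
-- ) -> list:
--     """Get bin indices for a symmetric binning scheme where inner bins are largest.
--
--     The largest bins are in the center of the range.
--
--     Parameters
--     ----------
--     bins : int
--         Number of bins.
--
--     Returns
--     -------
--     list
--         List of bin indices, with largest values in the center.
--
--     Raises
--     ------
--     ValueError
--         If the number of bins is not a positive integer.
--     """
--     if bins <= 0:
--         raise ValueError("Number of bins must be a positive integer.")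
--
--     half_bins = bins // 2
--     widths = [i + 1 for i in range(half_bins)]
--
--     if bins % 2 == 0:
--         # Even number of bins
--         widths = widths + widths[::-1]
--     else:
--         # Odd number of bins
--         widths = widths + [half_bins + 1] + widths[::-1]
--
--     return widths
-- ===== SOURCE B (Python) =====
-- def _get_bin_indices_inner(
--     bins: int,
-- ) -> list:
--     """Symmetric bin widths, largest in the center: width at i is min(i+1, bins-i)."""
--     if bins <= 0:
--         raise ValueError("Number of bins must be a positive integer.")
--     return [min(i + 1, bins - i) for i in range(bins)]
-- ===== Notes on version B (the rewrite author's own statement) =====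
-- stated objective: simpler
-- what changed: Replaces the half-list construction, reversal-and-concatenation and the even/odd parity branch with a single parity-free closed-form comprehension min(i+1, bins-i) over range(bins).
import Mathlib
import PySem

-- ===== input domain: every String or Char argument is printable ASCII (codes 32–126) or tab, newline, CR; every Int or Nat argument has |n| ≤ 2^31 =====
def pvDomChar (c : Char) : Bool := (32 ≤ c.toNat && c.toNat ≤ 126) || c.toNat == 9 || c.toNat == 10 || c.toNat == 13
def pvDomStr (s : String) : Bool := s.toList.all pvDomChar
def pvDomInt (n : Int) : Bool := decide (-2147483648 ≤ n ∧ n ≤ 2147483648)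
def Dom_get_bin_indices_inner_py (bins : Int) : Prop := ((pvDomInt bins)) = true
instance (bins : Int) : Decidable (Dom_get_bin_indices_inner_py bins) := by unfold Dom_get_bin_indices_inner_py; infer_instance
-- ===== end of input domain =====

-- ===== PORT A =====
-- B replaces A's half-list + reverse + parity branch by one closed-form pass min(i+1, bins-i); return value only.
def get_bin_indices_inner_py (bins : Int) : List Int :=
  let half_bins := PySem.Int.floordiv bins 2
  let widths := (PySem.List.pyRange 0 half_bins 1).map (fun i => i + 1)
  if PySem.Int.mod bins 2 == 0 then
    widths ++ ((PySem.List.slice? widths none none (-1)).getD [])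
  else
    widths ++ [half_bins + 1] ++ ((PySem.List.slice? widths none none (-1)).getD [])

-- ===== PORT B =====
def get_bin_indices_inner_py_alt (bins : Int) : List Int :=
  (PySem.List.pyRange 0 bins 1).map (fun i => min (i + 1) (bins - i))

-- ===== PRECONDITION & SPEC =====
-- A raises ValueError for bins <= 0; those inputs are excluded.
def Pre_get_bin_indices_inner_py (bins : Int) : Prop := 1 ≤ bins
instance (bins : Int) : Decidable (Pre_get_bin_indices_inner_py bins) := by unfold Pre_get_bin_indices_inner_py; infer_instance
def pvWitness_get_bin_indices_inner_py : Int := 5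
def Spec_get_bin_indices_inner_py (bins : Int) (out : List Int) : Prop := out = get_bin_indices_inner_py_alt bins
instance (bins : Int) (out : List Int) : Decidable (Spec_get_bin_indices_inner_py bins out) := by unfold Spec_get_bin_indices_inner_py; infer_instance

-- ===== CLAIM (what is proved, stated in full; the proofs are below) =====
def Claim_equal_get_bin_indices_inner_py : Prop := ∀ (bins : Int), Dom_get_bin_indices_inner_py bins → Pre_get_bin_indices_inner_py bins → Spec_get_bin_indices_inner_py bins (get_bin_indices_inner_py bins)

-- ===== LEMMAS AND PROOFS =====

theorem pv_main (n : Nat) :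
    get_bin_indices_inner_py (n : Int) = get_bin_indices_inner_py_alt (n : Int) := by
  unfold get_bin_indices_inner_py get_bin_indices_inner_py_alt
  have hfd : PySem.Int.floordiv (n : Int) 2 = ((n / 2 : Nat) : Int) := by
    rw [PySem.Int.floordiv_eq_ediv_of_pos (by omega)]; omega
  have hmd : PySem.Int.mod (n : Int) 2 = ((n % 2 : Nat) : Int) := by
    rw [PySem.Int.mod_eq_emod_of_pos (by omega)]; omega
  rw [hfd, hmd]
  simp only [PySem.List.slice?_none_none_neg_one, Option.getD_some,
    PySem.List.pyRange_one, Int.sub_zero, Int.toNat_natCast, List.map_map]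
  by_cases hpar : n % 2 = 0
  · rw [if_pos (by simp [hpar])]
    apply List.ext_getElem
    · simp only [List.length_append, List.length_reverse, List.length_map, List.length_range]
      omega
    · intro i h1 h2
      simp only [List.length_append, List.length_reverse, List.length_map,
        List.length_range] at h1
      simp only [List.length_map, List.length_range] at h2
      simp only [List.getElem_append, List.getElem_reverse, List.getElem_map,
        List.getElem_range, List.length_map, List.length_range, Function.comp_apply]
      split_ifs with h <;> omega
  · rw [if_neg (by simp; omega)]
    apply List.ext_getElem
    · simp only [List.length_append, List.length_reverse, List.length_map,
        List.length_singleton, List.length_range]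
      omega
    · intro i h1 h2
      simp only [List.length_append, List.length_reverse, List.length_map,
        List.length_singleton, List.length_range] at h1
      simp only [List.length_map, List.length_range] at h2
      simp only [List.getElem_append, List.getElem_reverse, List.getElem_map,
        List.getElem_range, List.getElem_singleton, List.length_map,
        List.length_range, Function.comp_apply]
      split_ifs with h h'
      all_goals
        simp only [List.length_append, List.length_map, List.length_range,
          List.length_reverse, List.length_cons, List.length_nil] at *
      all_goals omega

-- ===== VERDICT (by name: the statement is the Claim_ definition above) =====
theorem get_bin_indices_inner_py_spec : Claim_equal_get_bin_indices_inner_py := by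
  intro bins _ hpre
  unfold Spec_get_bin_indices_inner_py
  obtain ⟨n, rfl⟩ : ∃ m : Nat, bins = (m : Int) := ⟨bins.toNat, by
    have : (1 : Int) ≤ bins := hpre
    omega⟩
  exact pv_main n
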